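-- pv_equiv track=rewrite | github.com/brendeni1/BenBot | src/utils/text.py | truncateList
-- ===== SOURCE A (Python) =====
-- def truncateList(
--     inputList: list[str], limit: int, addRestLength: bool = True
-- ) -> list[str]:
--     """
--     Truncates a list of strings so that joining them with newlines stays within 'limit'.
--     If truncation occurs and addRestLength is True, appends '... and X more...'.
--     """
--     currentLength = 0
--     truncatedResult = []
--
--     # 1 is the length of the newline character "\n" used for joining later
--     separatorLength = 1
--
--     for i, item in enumerate(inputList):
--         # Calculate cost of adding this item (add separator cost only if not the first item)
--         itemCost = len(item) + (separatorLength if i > 0 else 0)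
--
--         # Check if adding this item exceeds the limit
--         if currentLength + itemCost > limit:
--             remainingCount = len(inputList) - i
--
--             if addRestLength:
--                 suffix = f"... and {remainingCount} more..."
--                 suffixCost = len(suffix) + separatorLength
--
--                 # If adding the suffix exceeds limit, remove previous items until it fits
--                 while truncatedResult and (currentLength + suffixCost > limit):
--                     removedItem = truncatedResult.pop()
--                     # Determine cost of the removed item (was it the first?)
--                     removedCost = len(removedItem) + (
--                         separatorLength if truncatedResult else 0
--                     )
--                     currentLength -= removedCost
--                     remainingCount += 1
--
--                     # Update suffix with new count
--                     suffix = f"... and {remainingCount} more..."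
--                     suffixCost = len(suffix) + separatorLength
--
--                 truncatedResult.append(suffix)
--
--             return truncatedResult
--
--         truncatedResult.append(item)
--         currentLength += itemCost
--
--     return truncatedResult
-- ===== SOURCE B (Python) =====
-- def truncateList(
--     inputList: list[str], limit: int, addRestLength: bool = True
-- ) -> list[str]:
--     n = len(inputList)
--     # cum[k] = length of "\n".join(inputList[:k])
--     cum = [0] * (n + 1)
--     for k, s in enumerate(inputList):
--         cum[k + 1] = cum[k] + len(s) + (1 if k > 0 else 0)
--     # first index whose inclusion overflows the limit
--     i = next((k for k in range(n) if cum[k + 1] > limit), None)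
--     if i is None:
--         return list(inputList)
--     if not addRestLength:
--         return inputList[:i]
--     m = i
--     while m > 0 and cum[m] + len(f"... and {n - m} more...") + 1 > limit:
--         m -= 1
--     return inputList[:m] + [f"... and {n - m} more..."]
-- ===== Notes on version B (the rewrite author's own statement) =====
-- stated objective: alternative
-- what changed: B precomputes a prefix-sum array of joined lengths, finds the first overflowing index by scanning it, and fits the '... and X more...' suffix by decrementing an index over the array, instead of A's single pass that mutates a result list and pops items off its end.
import Mathlib
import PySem

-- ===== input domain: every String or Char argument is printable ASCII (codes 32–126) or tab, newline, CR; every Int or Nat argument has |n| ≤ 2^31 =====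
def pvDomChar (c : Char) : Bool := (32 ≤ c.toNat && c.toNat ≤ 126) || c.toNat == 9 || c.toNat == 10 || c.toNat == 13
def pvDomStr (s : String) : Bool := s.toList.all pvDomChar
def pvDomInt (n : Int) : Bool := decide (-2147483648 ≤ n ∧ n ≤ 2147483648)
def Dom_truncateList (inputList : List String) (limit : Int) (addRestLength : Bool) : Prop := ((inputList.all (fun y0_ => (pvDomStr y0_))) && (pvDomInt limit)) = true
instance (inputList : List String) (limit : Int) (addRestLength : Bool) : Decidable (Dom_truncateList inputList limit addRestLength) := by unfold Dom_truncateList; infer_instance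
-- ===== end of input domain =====

-- B replaces A's build-then-pop mutation with a prefix-sum array, a first-overflow index search and a
-- descending fit index (objective: alternative decomposition, same cost).

-- shared denotation of the f-string f"... and {rem} more..." (kept on List Char so the kernel can reduce lengths)
def pvSuffix (rem : Int) : String := String.ofList ("... and ".toList ++ PySem.Int.toChars rem ++ " more...".toList)

-- ===== PORT A =====
-- the inner 'while truncatedResult and (currentLength + suffixCost > limit): pop' loop
def truncA_pop (trunc : List String) (cur rem limit : Int) : List String :=
  if h : trunc ≠ [] ∧ cur + (PySem.Str.len (pvSuffix rem) + 1) > limit then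
    let removed := trunc.getLast h.1
    let rest := trunc.dropLast
    let removedCost := PySem.Str.len removed + (if rest ≠ [] then (1:Int) else 0)
    truncA_pop rest (cur - removedCost) (rem + 1) limit
  else trunc ++ [pvSuffix rem]
termination_by trunc.length
decreasing_by
  simp only [List.length_dropLast]
  have := List.length_pos_iff.mpr h.1
  omega

-- the 'for i, item in enumerate(inputList)' loop, state = (index, currentLength, truncatedResult)
def truncA_loop (rest : List String) (i : Nat) (cur : Int) (trunc : List String)
    (n limit : Int) (addRest : Bool) : List String :=
  match rest with
  | [] => trunc
  | item :: tl =>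
    let itemCost := PySem.Str.len item + (if i > 0 then (1:Int) else 0)
    if cur + itemCost > limit then
      if addRest then truncA_pop trunc cur (n - i) limit else trunc
    else truncA_loop tl (i + 1) (cur + itemCost) (trunc ++ [item]) n limit addRest

def truncateList (inputList : List String) (limit : Int) (addRestLength : Bool) : List String :=
  truncA_loop inputList 0 0 [] (PySem.List.len inputList) limit addRestLength

-- ===== PORT B =====
-- running prefix sums: cumFrom l k c = [cum[k+1], …, cum[n]] given c = cum[k]
def cumFrom : List String → Nat → Int → List Int
  | [], _, _ => []
  | s :: tl, k, c =>
      let c' := c + PySem.Str.len s + (if k > 0 then (1:Int) else 0)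
      c' :: cumFrom tl (k + 1) c'

-- next((k for k in range(n) if cum[k+1] > limit), None) over the tail of the cum array
def firstOver : List Int → Nat → Int → Option Nat
  | [], _, _ => none
  | c :: tl, k, limit => if c > limit then some k else firstOver tl (k + 1) limit

-- 'while m > 0 and cum[m] + len(suffix) + 1 > limit: m -= 1'
def fitB (cum : List Int) (m : Nat) (n limit : Int) : Nat :=
  if m > 0 ∧ cum.getD m 0 + PySem.Str.len (pvSuffix (n - m)) + 1 > limit then
    fitB cum (m - 1) n limit
  else m
termination_by m

def truncateList_alt (inputList : List String) (limit : Int) (addRestLength : Bool) : List String :=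
  let n : Int := PySem.List.len inputList
  match firstOver (cumFrom inputList 0 0) 0 limit with
  | none => inputList
  | some i =>
    if !addRestLength then inputList.take i
    else
      let cum := 0 :: cumFrom inputList 0 0
      let m := fitB cum i n limit
      inputList.take m ++ [pvSuffix (n - m)]

-- ===== PRECONDITION & SPEC =====
def Spec_truncateList (inputList : List String) (limit : Int) (addRestLength : Bool) (out : List String) : Prop := out = truncateList_alt inputList limit addRestLength
instance (inputList : List String) (limit : Int) (addRestLength : Bool) (out : List String) : Decidable (Spec_truncateList inputList limit addRestLength out) := by unfold Spec_truncateList; infer_instance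

-- ===== CLAIM (what is proved, stated in full; the proofs are below) =====
def Claim_equal_truncateList : Prop := ∀ (inputList : List String) (limit : Int) (addRestLength : Bool), Dom_truncateList inputList limit addRestLength → Spec_truncateList inputList limit addRestLength (truncateList inputList limit addRestLength)

-- ===== LEMMAS AND PROOFS =====

-- joined length of a list of strings: sum of lengths + one separator between neighbours
def jl (l : List String) : Int :=
  (l.map PySem.Str.len).sum + (if l = [] then 0 else (l.length : Int) - 1)

theorem jl_step (pre : List String) (s : String) :
    jl (pre ++ [s]) = jl pre + PySem.Str.len s + (if pre.length > 0 then (1:Int) else 0) := by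
  cases pre with
  | nil => simp [jl]
  | cons a t => simp [jl]; ring

theorem truncA_loop_cons (s : String) (tl : List String) (i : Nat) (cur : Int)
    (trunc : List String) (n limit : Int) (addRest : Bool) :
    truncA_loop (s :: tl) i cur trunc n limit addRest =
      if cur + (PySem.Str.len s + (if i > 0 then (1:Int) else 0)) > limit then
        (if addRest then truncA_pop trunc cur (n - i) limit else trunc)
      else truncA_loop tl (i + 1) (cur + (PySem.Str.len s + (if i > 0 then (1:Int) else 0)))
        (trunc ++ [s]) n limit addRest := rfl

theorem cumFrom_cons (s : String) (tl : List String) (k : Nat) (c : Int) :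
    cumFrom (s :: tl) k c =
      (c + PySem.Str.len s + (if k > 0 then (1:Int) else 0))
        :: cumFrom tl (k + 1) (c + PySem.Str.len s + (if k > 0 then (1:Int) else 0)) := rfl

theorem firstOver_cons (c : Int) (tl : List Int) (k : Nat) (limit : Int) :
    firstOver (c :: tl) k limit = if c > limit then some k else firstOver tl (k + 1) limit := rfl

theorem cumFrom_getD (tl : List String) : ∀ (pre : List String) (j : Nat), j < tl.length →
    (cumFrom tl pre.length (jl pre)).getD j 0 = jl (pre ++ tl.take (j + 1)) := by
  induction tl with
  | nil => intro pre j hj; simp at hj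
  | cons s tl ih =>
    intro pre j hj
    have hstep : jl pre + PySem.Str.len s + (if pre.length > 0 then (1:Int) else 0)
        = jl (pre ++ [s]) := (jl_step pre s).symm
    rw [cumFrom_cons, hstep]
    cases j with
    | zero => simp
    | succ j =>
      have hlen : pre.length + 1 = (pre ++ [s]).length := by simp
      rw [List.getD_cons_succ, hlen]
      have := ih (pre ++ [s]) j (by simpa using hj)
      simpa [List.append_assoc] using this

theorem cum_getD (l : List String) (m : Nat) (hm : m ≤ l.length) :
    (0 :: cumFrom l 0 0).getD m 0 = jl (l.take m) := by
  cases m with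
  | zero => simp [jl]
  | succ j =>
    have h := cumFrom_getD l [] j (by omega)
    simpa [jl] using h

theorem popSync (l : List String) (n limit : Int) : ∀ (m : Nat), m ≤ l.length →
    truncA_pop (l.take m) (jl (l.take m)) (n - m) limit =
      l.take (fitB (0 :: cumFrom l 0 0) m n limit)
        ++ [pvSuffix (n - (fitB (0 :: cumFrom l 0 0) m n limit : Nat))] := by
  intro m
  induction m with
  | zero =>
    intro _
    rw [truncA_pop, fitB]
    simp
  | succ m ih =>
    intro hm
    have hm' : m < l.length := hm
    have htake : l.take (m + 1) ≠ [] := by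
      have : l ≠ [] := by intro h; subst h; simp at hm
      simp [List.take_eq_nil_iff, this]
    have hget : (0 :: cumFrom l 0 0).getD (m + 1) 0 = jl (l.take (m + 1)) :=
      cum_getD l (m + 1) hm
    have hsplit : l.take (m + 1) = l.take m ++ [l[m]] := by
      rw [List.take_add_one]
      simp [List.getElem?_eq_getElem hm']
    have hlen1 : (l.take (m + 1)).length = m + 1 := by rw [List.length_take]; omega
    have hgetlast : (l.take (m + 1)).getLast htake = l[m] := by
      simp [List.getLast_eq_getElem, hlen1, List.getElem_take]
    have hdrop : (l.take (m + 1)).dropLast = l.take m := by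
      rw [hsplit, List.dropLast_concat]
    by_cases hc : jl (l.take (m + 1)) + (PySem.Str.len (pvSuffix (n - ((m:Int) + 1))) + 1) > limit
    · -- pop one element / decrement m
      rw [truncA_pop, fitB]
      rw [dif_pos ⟨htake, by push_cast; exact hc⟩,
          if_pos ⟨by omega, by rw [hget]; push_cast; linarith⟩]
      rw [Nat.add_sub_cancel]
      have hcur : jl (l.take (m + 1)) -
          (PySem.Str.len ((l.take (m + 1)).getLast htake)
            + (if (l.take (m + 1)).dropLast ≠ [] then (1:Int) else 0)) = jl (l.take m) := by
        rw [hgetlast, hdrop, hsplit, jl_step]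
        by_cases h0 : l.take m = []
        · simp [h0]
        · have hp : (l.take m).length > 0 := List.length_pos_iff.mpr h0
          rw [if_pos h0, if_pos hp]; ring
      have hrem : n - ((m + 1 : Nat) : Int) + 1 = n - (m : Int) := by push_cast; ring
      simp only [hgetlast, hdrop]
      rw [show jl (l.take (m + 1)) - (PySem.Str.len l[m] + if l.take m ≠ [] then (1:Int) else 0)
            = jl (l.take m) from by rw [← hgetlast, ← hdrop] at *; exact hcur, hrem]
      exact ih (by omega)
    · -- loop ends: append the suffix at m + 1
      rw [truncA_pop, fitB]
      rw [dif_neg (by rintro ⟨_, h⟩; exact hc (by push_cast at h; exact h)),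
          if_neg (by rintro ⟨_, h⟩; rw [hget] at h; push_cast at h; linarith)]

theorem sync (tl : List String) : ∀ (trunc : List String) (n limit : Int) (addRest : Bool)
    (l : List String), l = trunc ++ tl →
    truncA_loop tl trunc.length (jl trunc) trunc n limit addRest =
      (match firstOver (cumFrom tl trunc.length (jl trunc)) trunc.length limit with
       | none => l
       | some i =>
         if !addRest then l.take i
         else
           l.take (fitB (0 :: cumFrom l 0 0) i n limit)
             ++ [pvSuffix (n - (fitB (0 :: cumFrom l 0 0) i n limit : Nat))]) := by
  induction tl with
  | nil => intro trunc n limit addRest l hl; simp [truncA_loop, cumFrom, firstOver, hl]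
  | cons s tl ih =>
    intro trunc n limit addRest l hl
    rw [truncA_loop_cons, cumFrom_cons, firstOver_cons]
    have hassoc : jl trunc + (PySem.Str.len s + (if trunc.length > 0 then (1:Int) else 0))
        = jl trunc + PySem.Str.len s + (if trunc.length > 0 then (1:Int) else 0) := by ring
    rw [hassoc]
    have hstep : jl trunc + PySem.Str.len s + (if trunc.length > 0 then (1:Int) else 0)
        = jl (trunc ++ [s]) := (jl_step trunc s).symm
    rw [hstep]
    by_cases hc : jl (trunc ++ [s]) > limit
    · rw [if_pos hc, if_pos hc]
      have htake : l.take trunc.length = trunc := by rw [hl, List.take_left]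
      cases addRest with
      | false => simp [htake]
      | true =>
        simp only [Bool.not_true, Bool.false_eq_true, if_false]
        have hle : trunc.length ≤ l.length := by rw [hl]; simp
        have := popSync l n limit trunc.length hle
        rw [htake] at this
        exact this
    · rw [if_neg hc, if_neg hc]
      have hlen : trunc.length + 1 = (trunc ++ [s]).length := by simp
      have hl' : l = (trunc ++ [s]) ++ tl := by rw [hl]; simp
      have := ih (trunc ++ [s]) n limit addRest l hl'
      rw [hlen]
      exact this

-- ===== VERDICT (by name: the statement is the Claim_ definition above) =====
theorem truncateList_spec : Claim_equal_truncateList := by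
  intro l limit addRest _
  unfold Spec_truncateList truncateList truncateList_alt
  have h := sync l [] (PySem.List.len l) limit addRest l (by simp)
  simpa [jl] using h
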